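-- pv_equiv track=rewrite | github.com/Maxtraveler/12 | core/promocode_source.py | _generate_by_mask_sync
-- ===== SOURCE A (Python) =====
-- from typing import AsyncIterator, Iterable, Iterator, Protocol
--
-- ALPHABET = "ABCDEFGHIJKLMNOPQRSTUVWXYZ0123456789"
--
-- def _generate_by_mask_sync(mask: str) -> Iterator[str]:
--     """
--     Синхронный генератор всех промокодов по маске.
--
--     Поддерживается символ 'X' как любая буква/цифра из ALPHABET.
--     Остальные символы маски считаются фиксированными.
--     """
--     if not mask:
--         return
--
--     indices = [0] * len(mask)
--     max_indices = [len(ALPHABET) - 1 if ch == "X" else 0 for ch in mask]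
--
--     def build_code() -> str:
--         chars = []
--         for ch, idx, max_idx in zip(mask, indices, max_indices):
--             if max_idx == 0 and ch != "X":
--                 chars.append(ch)
--             else:
--                 chars.append(ALPHABET[idx])
--         return "".join(chars)
--
--     # Первая комбинация
--     yield build_code()
--
--     while True:
--         carry = 1
--         for pos in range(len(indices) - 1, -1, -1):
--             if max_indices[pos] == 0 and mask[pos] != "X":
--                 continue
--             if carry == 0:
--                 break
--             indices[pos] += carry
--             if indices[pos] > max_indices[pos]:
--                 indices[pos] = 0
--                 carry = 1
--             else:
--                 carry = 0
--         if carry == 1: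
--             break
--         yield build_code()
-- ===== SOURCE B (Python) =====
-- import itertools
--
-- ALPHABET = "ABCDEFGHIJKLMNOPQRSTUVWXYZ0123456789"
--
-- def _generate_by_mask_sync(mask):
--     """Enumerate promocodes for mask via itertools.product over the 'X' slots
--     (rightmost slot fastest), instead of a hand-rolled carry/ripple counter."""
--     if not mask:
--         return
--     k = mask.count("X")
--     for combo in itertools.product(ALPHABET, repeat=k):
--         it = iter(combo)
--         yield "".join(next(it) if ch == "X" else ch for ch in mask)
-- ===== Notes on version B (the rewrite author's own statement) =====
-- stated objective: idiomatic
-- what changed: Replaces A's mutable per-position index array with carry/ripple odometer loop by direct Cartesian-product enumeration (itertools.product) over just the wildcard slots, filling them into the mask left to right; this also avoids A's per-yield full-mask carry scan.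
import Mathlib
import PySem

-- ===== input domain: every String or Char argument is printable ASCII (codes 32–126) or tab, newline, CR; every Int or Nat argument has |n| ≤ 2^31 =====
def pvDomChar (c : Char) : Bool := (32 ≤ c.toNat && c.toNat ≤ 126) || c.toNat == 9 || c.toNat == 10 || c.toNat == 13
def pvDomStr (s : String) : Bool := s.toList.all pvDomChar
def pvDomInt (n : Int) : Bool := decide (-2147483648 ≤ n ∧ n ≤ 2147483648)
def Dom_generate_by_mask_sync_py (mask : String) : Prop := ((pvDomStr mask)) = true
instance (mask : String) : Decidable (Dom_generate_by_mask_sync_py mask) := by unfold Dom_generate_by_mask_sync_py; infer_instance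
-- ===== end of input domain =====

-- B replaces A's carry/ripple odometer over an interleaved index array with
-- direct Cartesian-product enumeration over the 'X' slots (idiomatic itertools.product).

-- ===== PORT A =====

def pvAlpha : List Char := "ABCDEFGHIJKLMNOPQRSTUVWXYZ0123456789".toList

-- ALPHABET[idx]; every access in A's run is in range, so getD's default is never used
def pvAlphaGet (i : Nat) : Char := pvAlpha.getD i ' '

def pvMaxs (ms : List Char) : List Nat :=
  ms.map (fun ch => if ch = 'X' then pvAlpha.length - 1 else 0)

-- the inner `for pos in range(len-1,-1,-1)` carry loop: recurse on the tail first
-- (rightmost positions processed first), then handle the head with the incoming carry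
def pvStepFull : List Char → List Nat → List Nat → List Nat × Nat
  | ch :: cs, m :: maxs, i :: is =>
    if m = 0 ∧ ch ≠ 'X' then
      ((pvStepFull cs maxs is).1.cons i, (pvStepFull cs maxs is).2)
    else if (pvStepFull cs maxs is).2 = 0 then (i :: (pvStepFull cs maxs is).1, 0)
    else if i + 1 > m then (0 :: (pvStepFull cs maxs is).1, 1)
    else ((i + 1) :: (pvStepFull cs maxs is).1, 0)
  | _, _, _ => ([], 1)

-- build_code: zip(mask, indices, max_indices)
def pvBuildFull : List Char → List Nat → List Nat → List Char
  | ch :: cs, m :: maxs, i :: is =>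
    (if m = 0 ∧ ch ≠ 'X' then ch else pvAlphaGet i) :: pvBuildFull cs maxs is
  | _, _, _ => []

-- the `while True` loop; fuel only guards termination (36^len is proved sufficient below)
def pvLoopA (ms : List Char) (maxs : List Nat) : Nat → List Nat → List String
  | 0, is =>
    if (pvStepFull ms maxs is).2 = 1 then []
    else [String.mk (pvBuildFull ms maxs (pvStepFull ms maxs is).1)]
  | fuel + 1, is =>
    if (pvStepFull ms maxs is).2 = 1 then []
    else String.mk (pvBuildFull ms maxs (pvStepFull ms maxs is).1) ::
         pvLoopA ms maxs fuel (pvStepFull ms maxs is).1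

def generate_by_mask_sync_py (mask : String) : List String :=
  let ms := mask.toList
  if ms = [] then []
  else
    let maxs := pvMaxs ms
    let indices := List.replicate ms.length 0
    String.mk (pvBuildFull ms maxs indices) :: pvLoopA ms maxs (36 ^ ms.length) indices

-- ===== PORT B =====

-- itertools.product(ALPHABET, repeat=k): first coordinate varies slowest
def pvCombos : Nat → List (List Char)
  | 0 => [[]]
  | k + 1 => pvAlpha.flatMap (fun c => (pvCombos k).map (fun t => c :: t))

-- ''.join(next(it) if ch == 'X' else ch for ch in mask); the [] branch is unreachable
def pvFill : List Char → List Char → List Char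
  | [], _ => []
  | ch :: cs, ks =>
    if ch = 'X' then
      match ks with
      | k :: ks' => k :: pvFill cs ks'
      | [] => pvFill cs []
    else ch :: pvFill cs ks

def generate_by_mask_sync_py_alt (mask : String) : List String :=
  let ms := mask.toList
  if ms = [] then []
  else (pvCombos (ms.count 'X')).map (fun combo => String.mk (pvFill ms combo))

-- ===== PRECONDITION & SPEC =====
def Spec_generate_by_mask_sync_py (mask : String) (out : List String) : Prop := out = generate_by_mask_sync_py_alt mask
instance (mask : String) (out : List String) : Decidable (Spec_generate_by_mask_sync_py mask out) := by unfold Spec_generate_by_mask_sync_py; infer_instance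

-- ===== CLAIM (what is proved, stated in full; the proofs are below) =====
def Claim_equal_generate_by_mask_sync_py : Prop := ∀ (mask : String), Dom_generate_by_mask_sync_py mask → Spec_generate_by_mask_sync_py mask (generate_by_mask_sync_py mask)

-- ===== LEMMAS AND PROOFS =====

-- digit-level abstraction: A's index state restricted to the 'X' positions
def pvZeros (n : Nat) : List Nat := List.replicate n 0

def pvStepD : List Nat → List Nat × Nat
  | [] => ([], 1)
  | c :: d =>
    if (pvStepD d).2 = 0 then (c :: (pvStepD d).1, 0)
    else if c + 1 > 35 then (0 :: (pvStepD d).1, 1)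
    else ((c + 1) :: (pvStepD d).1, 0)

def pvSeq : Nat → List Nat → List (List Nat)
  | 0, d => d :: (if (pvStepD d).2 = 1 then [] else [(pvStepD d).1])
  | f + 1, d => d :: (if (pvStepD d).2 = 1 then [] else pvSeq f (pvStepD d).1)

def pvAllD : Nat → List (List Nat)
  | 0 => [[]]
  | n + 1 => (List.range 36).flatMap (fun c => (pvAllD n).map (fun t => c :: t))

-- the suffix of pvAllD starting at digit vector d
def pvSufD : List Nat → List (List Nat)
  | [] => [[]]
  | c :: d =>
    ((pvSufD d).map (fun t => c :: t)) ++
    (List.range' (c + 1) (35 - c)).flatMap (fun c' => (pvAllD d.length).map (fun t => c' :: t))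

-- interleave the digits back into the full index array (0 at fixed positions)
def pvEmbed : List Char → List Nat → List Nat
  | [], _ => []
  | ch :: cs, d =>
    if ch = 'X' then
      match d with
      | x :: xs => x :: pvEmbed cs xs
      | [] => []
    else 0 :: pvEmbed cs d

theorem pvAlpha_len : pvAlpha.length = 36 := by decide

theorem pvStepD_len (d : List Nat) : (pvStepD d).1.length = d.length := by
  induction d with
  | nil => rfl
  | cons c d ih => simp only [pvStepD]; split_ifs <;> simp [ih]

theorem pvStepD_carry (d : List Nat) : (pvStepD d).2 = 0 ∨ (pvStepD d).2 = 1 := by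
  induction d with
  | nil => right; rfl
  | cons c d ih => simp only [pvStepD]; split_ifs <;> simp

theorem pvS0 (d : List Nat) (h : (pvStepD d).2 = 1) : (pvStepD d).1 = pvZeros d.length := by
  induction d with
  | nil => rfl
  | cons c d ih =>
    have hc := pvStepD_carry d
    simp only [pvStepD] at h ⊢
    split_ifs at h ⊢ with h1 h2
    have h1' : (pvStepD d).2 = 1 := by omega
    simp only [pvZeros, List.length_cons, List.replicate_succ, List.cons.injEq]
    exact ⟨trivial, ih h1'⟩

theorem pvAllD_len (n : Nat) : (pvAllD n).length = 36 ^ n := by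
  induction n with
  | zero => rfl
  | succ n ih =>
    rw [pvAllD, List.length_flatMap]
    simp only [List.length_map, ih]
    rw [List.map_const', List.sum_replicate, List.length_range, smul_eq_mul,
        Nat.pow_succ, Nat.mul_comm]

theorem pvSufD_ne_nil (d : List Nat) : pvSufD d ≠ [] := by
  cases d with
  | nil => simp [pvSufD]
  | cons c d =>
    simp only [pvSufD]
    intro h
    rcases List.append_eq_nil_iff.mp h with ⟨h1, _⟩
    exact pvSufD_ne_nil d (List.map_eq_nil_iff.mp h1)

theorem pvSZ (n : Nat) : pvSufD (pvZeros n) = pvAllD n := by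
  induction n with
  | zero => rfl
  | succ n ih =>
    show pvSufD (0 :: pvZeros n) = pvAllD (n + 1)
    simp only [pvSufD, pvAllD, ih]
    have h36 : List.range 36 = 0 :: List.range' 1 35 := by decide
    simp [h36, pvZeros]

theorem pvSZ' (n : Nat) : pvSufD (List.replicate n 0) = pvAllD n := pvSZ n

theorem pvS1 (d : List Nat) (hlt : ∀ x ∈ d, x < 36) (h : (pvStepD d).2 = 1) :
    pvSufD d = [d] := by
  induction d with
  | nil => rfl
  | cons c d ih =>
    have hcd := pvStepD_carry d
    simp only [pvStepD] at h
    split_ifs at h with h1 h2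
    have hc : c = 35 := by
      have := hlt c (by simp)
      omega
    have hd : (pvStepD d).2 = 1 := by omega
    simp only [pvSufD, ih (fun x hx => hlt x (by simp [hx])) hd, hc]
    norm_num

theorem pvS2 (d : List Nat) (hlt : ∀ x ∈ d, x < 36) (h : (pvStepD d).2 = 0) :
    pvSufD d = d :: pvSufD (pvStepD d).1 ∧ ∀ x ∈ (pvStepD d).1, x < 36 := by
  induction d with
  | nil => simp [pvStepD] at h
  | cons c d ih =>
    have hlt' : ∀ x ∈ d, x < 36 := fun x hx => hlt x (by simp [hx])
    have hcd := pvStepD_carry d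
    simp only [pvStepD] at h ⊢
    split_ifs at h ⊢ with h1 h2
    · -- tail had no carry
      obtain ⟨he, hb⟩ := ih hlt' h1
      constructor
      · simp only [pvSufD, he, List.map_cons, pvStepD_len]
        simp
      · intro x hx
        simp at hx
        rcases hx with hx | hx
        · exact hx ▸ hlt c (by simp)
        · exact hb x hx
    · -- tail overflowed, head increments: c < 35
      have hcarry : (pvStepD d).2 = 1 := by omega
      have hz : (pvStepD d).1 = pvZeros d.length := pvS0 d hcarry
      have hone : pvSufD d = [d] := pvS1 d hlt' hcarry
      constructor
      · simp only [pvSufD, hone, hz, pvZeros, List.length_replicate]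
        have hsplit : List.range' (c + 1) (35 - c) =
            (c + 1) :: List.range' (c + 2) (35 - (c + 1)) := by
          have : 35 - c = (35 - (c + 1)) + 1 := by omega
          rw [this, List.range'_succ]
        simp [hsplit, pvSZ']
      · intro x hx
        simp at hx
        rcases hx with hx | hx
        · omega
        · rw [hz] at hx
          simp [pvZeros] at hx
          omega

theorem pvGEN (f : Nat) (d : List Nat) (hlt : ∀ x ∈ d, x < 36)
    (hf : (pvSufD d).length ≤ f + 1) : pvSeq f d = pvSufD d := by
  induction f generalizing d with
  | zero =>
    rcases pvStepD_carry d with h0 | h0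
    · obtain ⟨he, _⟩ := pvS2 d hlt h0
      have hne := pvSufD_ne_nil (pvStepD d).1
      rw [he] at hf
      simp only [List.length_cons] at hf
      exact absurd (List.length_eq_zero_iff.mp (by omega)) hne
    · simp [pvSeq, h0, pvS1 d hlt h0]
  | succ f ih =>
    rcases pvStepD_carry d with h0 | h0
    · obtain ⟨he, hb⟩ := pvS2 d hlt h0
      rw [he] at hf ⊢
      simp only [List.length_cons] at hf
      simp only [pvSeq, h0]
      simp only [List.cons.injEq, true_and]
      exact ih (pvStepD d).1 hb (by omega)
    · simp [pvSeq, h0, pvS1 d hlt h0]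

-- bridges between the full interleaved state and the digit state

theorem pvEmbed_zeros (ms : List Char) :
    List.replicate ms.length 0 = pvEmbed ms (pvZeros (ms.count 'X')) := by
  induction ms with
  | nil => rfl
  | cons ch cs ih =>
    by_cases hx : ch = 'X'
    · subst hx
      rw [show ('X' :: cs).count 'X' = cs.count 'X' + 1 from by simp]
      rw [show pvZeros (cs.count 'X' + 1) = 0 :: pvZeros (cs.count 'X') from rfl]
      simp [pvEmbed, List.replicate_succ, ih]
    · rw [show (ch :: cs).count 'X' = cs.count 'X' from by simp [hx]]
      simp [pvEmbed, List.replicate_succ, hx, ih]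

theorem pvMaxs_cons (ch : Char) (cs : List Char) :
    pvMaxs (ch :: cs) = (if ch = 'X' then 35 else 0) :: pvMaxs cs := by
  simp [pvMaxs, pvAlpha_len]

theorem pvStep_bridge (ms : List Char) (d : List Nat) (hl : d.length = ms.count 'X') :
    pvStepFull ms (pvMaxs ms) (pvEmbed ms d) = (pvEmbed ms (pvStepD d).1, (pvStepD d).2) := by
  induction ms generalizing d with
  | nil =>
    simp at hl
    subst hl
    rfl
  | cons ch cs ih =>
    rw [pvMaxs_cons]
    by_cases hx : ch = 'X'
    · subst hx
      rw [if_pos rfl]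
      obtain ⟨x, xs, rfl⟩ : ∃ x xs, d = x :: xs := by
        cases d with
        | nil => simp at hl
        | cons x xs => exact ⟨x, xs, rfl⟩
      have hl' : xs.length = cs.count 'X' := by simpa [List.count_cons] using hl
      have hIH := ih xs hl'
      have he : pvEmbed ('X' :: cs) (x :: xs) = x :: pvEmbed cs xs := by simp [pvEmbed]
      rw [he]
      simp only [pvStepFull, hIH, pvStepD]
      norm_num
      split_ifs <;> simp [pvEmbed]
    · rw [if_neg hx]
      rw [show (ch :: cs).count 'X' = cs.count 'X' from by simp [hx]] at hl
      have hIH := ih d hl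
      have he : pvEmbed (ch :: cs) d = 0 :: pvEmbed cs d := by simp [pvEmbed, hx]
      have he2 : pvEmbed (ch :: cs) (pvStepD d).1 = 0 :: pvEmbed cs (pvStepD d).1 := by
        simp [pvEmbed, hx]
      rw [he, he2]
      simp only [pvStepFull, hIH]
      simp [hx]

theorem pvBuild_bridge (ms : List Char) (d : List Nat) (hl : d.length = ms.count 'X') :
    pvBuildFull ms (pvMaxs ms) (pvEmbed ms d) = pvFill ms (d.map pvAlphaGet) := by
  induction ms generalizing d with
  | nil => rfl
  | cons ch cs ih =>
    rw [pvMaxs_cons]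
    by_cases hx : ch = 'X'
    · subst hx
      rw [if_pos rfl]
      obtain ⟨x, xs, rfl⟩ : ∃ x xs, d = x :: xs := by
        cases d with
        | nil => simp at hl
        | cons x xs => exact ⟨x, xs, rfl⟩
      have hl' : xs.length = cs.count 'X' := by simpa [List.count_cons] using hl
      have he : pvEmbed ('X' :: cs) (x :: xs) = x :: pvEmbed cs xs := by simp [pvEmbed]
      rw [he]
      simp [pvBuildFull, pvFill, ih xs hl']
    · rw [if_neg hx]
      rw [show (ch :: cs).count 'X' = cs.count 'X' from by simp [hx]] at hl
      have he : pvEmbed (ch :: cs) d = 0 :: pvEmbed cs d := by simp [pvEmbed, hx]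
      rw [he]
      simp [pvBuildFull, pvFill, hx, ih d hl]

theorem pvLoop_bridge (ms : List Char) (f : Nat) (d : List Nat)
    (hl : d.length = ms.count 'X') :
    String.mk (pvBuildFull ms (pvMaxs ms) (pvEmbed ms d)) ::
      pvLoopA ms (pvMaxs ms) f (pvEmbed ms d) =
    (pvSeq f d).map (fun e => String.mk (pvFill ms (e.map pvAlphaGet))) := by
  induction f generalizing d with
  | zero =>
    simp only [pvLoopA, pvStep_bridge ms d hl, pvSeq]
    split_ifs with h
    · simp [pvBuild_bridge ms d hl]
    · have hl2 : (pvStepD d).1.length = ms.count 'X' := by rw [pvStepD_len]; exact hl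
      simp [pvBuild_bridge ms d hl, pvBuild_bridge ms (pvStepD d).1 hl2]
  | succ f ih =>
    simp only [pvLoopA, pvStep_bridge ms d hl, pvSeq]
    split_ifs with h
    · simp [pvBuild_bridge ms d hl]
    · have hl2 : (pvStepD d).1.length = ms.count 'X' := by rw [pvStepD_len]; exact hl
      rw [List.map_cons, ← ih (pvStepD d).1 hl2]
      simp [pvBuild_bridge ms d hl]

theorem pvCombos_eq (k : Nat) : pvCombos k = (pvAllD k).map (List.map pvAlphaGet) := by
  induction k with
  | zero => rfl
  | succ k ih =>
    have halpha : pvAlpha = (List.range 36).map pvAlphaGet := by decide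
    simp only [pvCombos, pvAllD, ih, halpha]
    rw [List.flatMap_map]
    simp [List.map_flatMap, Function.comp_def]

-- ===== VERDICT (by name: the statement is the Claim_ definition above) =====
theorem generate_by_mask_sync_py_spec : Claim_equal_generate_by_mask_sync_py := by
  intro mask _
  unfold Spec_generate_by_mask_sync_py generate_by_mask_sync_py generate_by_mask_sync_py_alt
  by_cases hnil : mask.toList = []
  · simp [hnil]
  · simp only [if_neg hnil]
    set ms := mask.toList with hms
    set k := ms.count 'X' with hk
    have hzl : (pvZeros k).length = k := by simp [pvZeros]
    have hfuel : (pvSufD (pvZeros k)).length ≤ 36 ^ ms.length + 1 := by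
      rw [pvSZ, pvAllD_len]
      have hkle : k ≤ ms.length := by
        rw [hk]; exact List.count_le_length
      have := Nat.pow_le_pow_right (by norm_num : 1 ≤ 36) hkle
      omega
    have hlt : ∀ x ∈ pvZeros k, x < 36 := by
      intro x hx; simp [pvZeros] at hx; omega
    rw [pvEmbed_zeros ms]
    rw [pvLoop_bridge ms (36 ^ ms.length) (pvZeros k) hzl]
    rw [pvGEN (36 ^ ms.length) (pvZeros k) hlt hfuel, pvSZ, pvCombos_eq, List.map_map]
    rfl
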